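-- pv_equiv track=rewrite | github.com/navispeed/adventofcode2023 | day6/day6.py | compute_total_distance
-- ===== SOURCE A (Python) =====
-- def compute_total_distance(total_time, button_hold_time):
--     current_speed = 0
--     total_distance = 0
--     for current_time in range(total_time):
--         if current_time < button_hold_time:
--             current_speed += 1
--         else:
--             total_distance += current_speed
--     return total_distance
-- ===== SOURCE B (Python) =====
-- def compute_total_distance(total_time, button_hold_time):
--     hold = min(max(button_hold_time, 0), max(total_time, 0))
--     return hold * (total_time - hold)
-- ===== Notes on version B (the rewrite author's own statement) =====
-- stated objective: faster
-- what changed: Replaced the per-tick simulation loop with the closed form hold*(total_time-hold) where hold is the button time clamped into [0, total_time].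
import Mathlib
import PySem

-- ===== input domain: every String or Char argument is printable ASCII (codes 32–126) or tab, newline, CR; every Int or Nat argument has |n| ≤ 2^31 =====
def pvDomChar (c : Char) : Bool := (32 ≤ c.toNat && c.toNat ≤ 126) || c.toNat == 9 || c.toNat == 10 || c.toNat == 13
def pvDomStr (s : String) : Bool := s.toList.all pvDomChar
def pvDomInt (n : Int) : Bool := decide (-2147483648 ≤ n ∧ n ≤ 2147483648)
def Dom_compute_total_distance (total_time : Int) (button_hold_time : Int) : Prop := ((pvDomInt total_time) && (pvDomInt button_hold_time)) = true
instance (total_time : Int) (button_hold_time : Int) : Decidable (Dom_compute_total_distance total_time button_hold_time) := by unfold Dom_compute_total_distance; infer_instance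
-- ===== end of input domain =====

-- B replaces A's per-tick simulation loop with the O(1) closed form hold*(total_time-hold), hold clamped into [0, total_time].


-- ===== PORT A =====
def compute_total_distance (total_time : Int) (button_hold_time : Int) : Int :=
  -- state (current_speed, total_distance)
  let st := (PySem.List.pyRange 0 total_time 1).foldl
    (fun (s : Int × Int) current_time =>
      if current_time < button_hold_time then (s.1 + 1, s.2) else (s.1, s.2 + s.1))
    (0, 0)
  st.2

-- ===== PORT B =====
def compute_total_distance_alt (total_time : Int) (button_hold_time : Int) : Int :=
  let hold := min (max button_hold_time 0) (max total_time 0)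
  hold * (total_time - hold)

-- ===== PRECONDITION & SPEC =====
def Spec_compute_total_distance (total_time : Int) (button_hold_time : Int) (out : Int) : Prop := out = compute_total_distance_alt total_time button_hold_time
instance (total_time : Int) (button_hold_time : Int) (out : Int) : Decidable (Spec_compute_total_distance total_time button_hold_time out) := by unfold Spec_compute_total_distance; infer_instance

-- ===== CLAIM (what is proved, stated in full; the proofs are below) =====
def Claim_equal_compute_total_distance : Prop := ∀ (total_time : Int) (button_hold_time : Int), Dom_compute_total_distance total_time button_hold_time → Spec_compute_total_distance total_time button_hold_time (compute_total_distance total_time button_hold_time)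

-- ===== LEMMAS AND PROOFS =====

-- Invariant of A's loop over range(0, n): the state after n ticks is
-- (min (max b 0) n, S * (n - S)) where S = min (max b 0) n.
theorem ctd_loop_inv (b : Int) (n : Nat) :
    (PySem.List.pyRange 0 (n : Int) 1).foldl
      (fun (s : Int × Int) t => if t < b then (s.1 + 1, s.2) else (s.1, s.2 + s.1)) (0, 0)
    = (min (max b 0) (n : Int), min (max b 0) (n : Int) * ((n : Int) - min (max b 0) (n : Int))) := by
  induction n with
  | zero => simp [PySem.List.pyRange_one_eq_nil]
  | succ n ih =>
    rw [show ((n + 1 : Nat) : Int) = (n : Int) + 1 by push_cast; ring,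
        PySem.List.pyRange_one_succ_right (by positivity), List.foldl_append, ih]
    simp only [List.foldl_cons, List.foldl_nil]
    by_cases h : (n : Int) < b
    · have h1 : min (max b 0) ((n : Int)) = (n : Int) := by omega
      have h2 : min (max b 0) ((n : Int) + 1) = (n : Int) + 1 := by omega
      simp [h, h1]
    · have h1 : min (max b 0) ((n : Int)) = max b 0 := by omega
      have h2 : min (max b 0) ((n : Int) + 1) = max b 0 := by omega
      simp only [if_neg h, h1, h2]
      exact Prod.ext rfl (by ring)

-- ===== VERDICT (by name: the statement is the Claim_ definition above) =====
theorem compute_total_distance_spec : Claim_equal_compute_total_distance := by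
  intro T b _
  unfold Spec_compute_total_distance compute_total_distance compute_total_distance_alt
  by_cases hT : T ≤ 0
  · have hmin : min (max b 0) (max T 0) = 0 := by omega
    simp [PySem.List.pyRange_one_eq_nil hT, hmin]
  · have hTn : ((T.toNat : Nat) : Int) = T := by omega
    have := ctd_loop_inv b T.toNat
    rw [hTn] at this
    rw [this]
    have : max T 0 = T := by omega
    rw [this]
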